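-- pv_equiv track=rewrite | github.com/hosseinbahak/HEDA | app/agents/defender.py | _identify_concessions
-- ===== SOURCE A (Python) =====
-- from typing import Dict, Any, List
--
-- def _identify_concessions(response: str) -> List[str]:
--     """Identify any concessions made by the defender."""
--     concessions = []
--     concession_phrases = ['however', 'admittedly', 'it is true that', 'while', 'although']
--
--     for phrase in concession_phrases:
--         if phrase in response.lower():
--             # Extract sentence containing the phrase
--             sentences = response.split('.')
--             for sentence in sentences:
--                 if phrase in sentence.lower():
--                     concessions.append(sentence.strip())
--                     break
--
--     return concessions[:3]  # Return top 3 concessions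
-- ===== SOURCE B (Python) =====
-- from typing import List
--
-- def _identify_concessions(response: str) -> List[str]:
--     """Identify any concessions made by the defender."""
--     concession_phrases = ['however', 'admittedly', 'it is true that', 'while', 'although']
--     found = {}
--     for sentence in response.split('.'):
--         low = sentence.lower()
--         for phrase in concession_phrases:
--             if phrase not in found and phrase in low:
--                 found[phrase] = sentence.strip()
--     return [found[p] for p in concession_phrases if p in found][:3]
-- ===== Notes on version B (the rewrite author's own statement) =====
-- stated objective: alternative
-- what changed: Inverts the loop nesting: splits the response once and makes a single pass over sentences recording the first matching sentence per phrase in a dict, then emits recorded sentences in phrase order, instead of re-splitting and re-scanning the sentence list for each phrase.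
import Mathlib
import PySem

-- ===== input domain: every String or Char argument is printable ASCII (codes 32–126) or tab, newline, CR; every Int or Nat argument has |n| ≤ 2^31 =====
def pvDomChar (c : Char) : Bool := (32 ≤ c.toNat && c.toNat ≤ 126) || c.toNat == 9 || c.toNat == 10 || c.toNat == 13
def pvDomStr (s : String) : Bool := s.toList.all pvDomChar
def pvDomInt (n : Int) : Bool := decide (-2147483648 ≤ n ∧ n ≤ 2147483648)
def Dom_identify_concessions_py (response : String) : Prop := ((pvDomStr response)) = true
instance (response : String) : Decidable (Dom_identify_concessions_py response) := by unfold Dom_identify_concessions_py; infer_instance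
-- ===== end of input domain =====

-- B inverts A's loop nesting (one split, one pass over sentences recording the first match per phrase in a dict); same result, proved equal on all inputs.

-- ===== PORT A =====
-- the five concession phrases (module literal, shared by both ports)
def pvPhrases : List (List Char) :=
  ["however".toList, "admittedly".toList, "it is true that".toList, "while".toList, "although".toList]

-- A's inner 'for sentence in sentences: … break' loop
def pvLoopA (phrase : List Char) (sentences : List (List Char)) (conc : List (List Char)) : List (List Char) :=
  match sentences with
  | [] => conc
  | s :: rest =>
      if PySem.Chars.isIn phrase (PySem.Chars.lower s) then conc ++ [PySem.Chars.strip s]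
      else pvLoopA phrase rest conc

def identify_concessions_py (response : String) : List String :=
  let conc := pvPhrases.foldl (fun conc phrase =>
    if PySem.Chars.isIn phrase (PySem.Chars.lower response.toList) then
      pvLoopA phrase (PySem.Chars.splitOn response.toList ['.']) conc
    else conc) []
  (PySem.List.slice conc none (some 3)).map String.ofList

-- ===== PORT B =====
def identify_concessions_py_alt (response : String) : List String :=
  let sentences := PySem.Chars.splitOn response.toList ['.']
  let found := sentences.foldl (fun d s =>
      let low := PySem.Chars.lower s
      pvPhrases.foldl (fun d p =>
        if !d.contains p && PySem.Chars.isIn p low then d.insert p (PySem.Chars.strip s) else d) d)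
    PySem.Dict.empty
  (PySem.List.slice (pvPhrases.filterMap (fun p => found.get? p)) none (some 3)).map String.ofList

-- ===== PRECONDITION & SPEC =====
def Spec_identify_concessions_py (response : String) (out : List String) : Prop := out = identify_concessions_py_alt response
instance (response : String) (out : List String) : Decidable (Spec_identify_concessions_py response out) := by unfold Spec_identify_concessions_py; infer_instance

-- ===== CLAIM (what is proved, stated in full; the proofs are below) =====
def Claim_equal_identify_concessions_py : Prop := ∀ (response : String), Dom_identify_concessions_py response → Spec_identify_concessions_py response (identify_concessions_py response)

-- ===== LEMMAS AND PROOFS =====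

-- every piece produced by splitOn.go is an infix of a list covering its state
theorem pv_splitOn_go_infix (sep : List Char) (fuel : Nat) :
    ∀ (l cur : List Char) (acc : List (List Char)) (seg : List Char) (s : List Char),
      cur.reverse ++ l <:+: s → (∀ x ∈ acc, x <:+: s) →
      seg ∈ PySem.Chars.splitOn.go sep fuel l cur acc → seg <:+: s := by
  induction fuel with
  | zero =>
    intro l cur acc seg s h1 h2 hm
    rw [PySem.Chars.splitOn.go.eq_def] at hm
    simp only [List.mem_reverse, List.mem_cons] at hm
    rcases hm with rfl | hm
    · exact h1
    · exact h2 _ hm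
  | succ fuel ih =>
    intro l cur acc seg s h1 h2 hm
    rw [PySem.Chars.splitOn.go.eq_def] at hm
    match l with
    | [] =>
      simp only [List.mem_reverse, List.mem_cons] at hm
      rcases hm with rfl | hm
      · simpa using h1
      · exact h2 _ hm
    | c :: rest =>
      simp only at hm
      split at hm
      · refine ih _ _ _ _ _ ?_ ?_ hm
        · simp only [List.reverse_nil, List.nil_append]
          exact ((List.drop_suffix sep.length (c :: rest)).isInfix).trans
            (((List.suffix_append cur.reverse (c :: rest)).isInfix).trans h1)
        · intro x hx
          rcases List.mem_cons.mp hx with rfl | hx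
          · exact ((List.prefix_append cur.reverse (c :: rest)).isInfix).trans h1
          · exact h2 _ hx
      · refine ih _ _ _ _ _ ?_ h2 hm
        simpa using h1

-- every piece produced by splitOn is an infix of the original list
theorem pv_mem_splitOn_infix (s sep seg : List Char) (h : seg ∈ PySem.Chars.splitOn s sep) :
    seg <:+: s := by
  refine pv_splitOn_go_infix sep (s.length + 1) s [] [] seg s ?_ (by simp) h
  simp

-- A's inner loop appends the stripped first matching sentence (if any)
theorem pv_loopA_eq (phrase : List Char) (ss : List (List Char)) (conc : List (List Char)) :
    pvLoopA phrase ss conc =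
      conc ++ ((ss.find? (fun s => PySem.Chars.isIn phrase (PySem.Chars.lower s))).map PySem.Chars.strip).toList := by
  induction ss with
  | nil => simp [pvLoopA]
  | cons s rest ih =>
    rw [pvLoopA, List.find?_cons]
    by_cases h : PySem.Chars.isIn phrase (PySem.Chars.lower s) = true
    · simp [h]
    · simp only [Bool.not_eq_true] at h
      simp [h, ih]

-- if the phrase does not occur in the lowered response, no sentence matches it
theorem pv_guard_false (response : String) (p : List Char)
    (h : PySem.Chars.isIn p (PySem.Chars.lower response.toList) = false) :
    (PySem.Chars.splitOn response.toList ['.']).find?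
      (fun s => PySem.Chars.isIn p (PySem.Chars.lower s)) = none := by
  rw [List.find?_eq_none]
  intro x hx hcon
  have hinf : x <:+: response.toList := pv_mem_splitOn_infix _ _ _ hx
  have hlow : PySem.Chars.lower x <:+: PySem.Chars.lower response.toList := by
    simpa [PySem.Chars.lower] using List.IsInfix.map PySem.Chars.lowerChar hinf
  have hp : p <:+: PySem.Chars.lower response.toList :=
    ((PySem.Chars.isIn_iff_infix _ _).mp hcon).trans hlow
  rw [PySem.Chars.isIn_eq_false_iff] at h
  exact h hp

-- one sentence step of B's dict fold, seen through get?
theorem pv_inner_get? (ps : List (List Char)) (d : PySem.Dict (List Char) (List Char))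
    (s : List Char) (q : List Char) :
    (ps.foldl (fun d p =>
        if !d.contains p && PySem.Chars.isIn p (PySem.Chars.lower s) then d.insert p (PySem.Chars.strip s) else d) d).get? q
      = if q ∈ ps ∧ d.get? q = none ∧ PySem.Chars.isIn q (PySem.Chars.lower s) = true
        then some (PySem.Chars.strip s) else d.get? q := by
  induction ps generalizing d with
  | nil => simp
  | cons p ps ih =>
    rw [List.foldl_cons, ih]
    by_cases hqp : q = p
    · subst hqp
      rcases hdq : d.get? q with _ | v
      · by_cases hin : PySem.Chars.isIn q (PySem.Chars.lower s) = true
        · have hc : d.contains q = false := by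
            rw [PySem.Dict.contains_eq_isSome_get?, hdq]; rfl
          simp [hc, hin, PySem.Dict.get?_insert, hdq]
        · simp only [Bool.not_eq_true] at hin
          simp [hin, hdq]
      · have hc : d.contains q = true := by
          rw [PySem.Dict.contains_eq_isSome_get?, hdq]; rfl
        simp [hc, hdq]
    · have hstep : (if !d.contains p && PySem.Chars.isIn p (PySem.Chars.lower s) then d.insert p (PySem.Chars.strip s) else d).get? q = d.get? q := by
        split
        · rw [PySem.Dict.get?_insert]; simp [hqp]
        · rfl
      rw [hstep]
      simp [List.mem_cons, hqp]

-- B's dict fold records, per phrase, the stripped first matching sentence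
theorem pv_outer_get? (L : List (List Char)) (d : PySem.Dict (List Char) (List Char))
    (q : List Char) (hq : q ∈ pvPhrases) :
    (L.foldl (fun d s =>
        pvPhrases.foldl (fun d p =>
          if !d.contains p && PySem.Chars.isIn p (PySem.Chars.lower s) then d.insert p (PySem.Chars.strip s) else d) d) d).get? q
      = match d.get? q with
        | some v => some v
        | none => (L.find? (fun s => PySem.Chars.isIn q (PySem.Chars.lower s))).map PySem.Chars.strip := by
  induction L generalizing d with
  | nil => rcases hdq : d.get? q with _ | v <;> simp [hdq]
  | cons s L ih =>
    rw [List.foldl_cons, ih, pv_inner_get?, List.find?_cons]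
    rcases hdq : d.get? q with _ | v
    · by_cases hin : PySem.Chars.isIn q (PySem.Chars.lower s) = true
      · simp [hq, hin, hdq]
      · simp only [Bool.not_eq_true] at hin
        simp [hin, hdq]
    · simp [hdq]

-- A's phrase fold produces exactly the filterMap of first matches
theorem pv_foldA_eq (response : String) (ps : List (List Char)) (conc : List (List Char)) :
    ps.foldl (fun conc phrase =>
        if PySem.Chars.isIn phrase (PySem.Chars.lower response.toList) then
          pvLoopA phrase (PySem.Chars.splitOn response.toList ['.']) conc
        else conc) conc
      = conc ++ ps.filterMap (fun p =>
          ((PySem.Chars.splitOn response.toList ['.']).find?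
            (fun s => PySem.Chars.isIn p (PySem.Chars.lower s))).map PySem.Chars.strip) := by
  induction ps generalizing conc with
  | nil => simp
  | cons p ps ih =>
    rw [List.foldl_cons, List.filterMap_cons]
    by_cases hg : PySem.Chars.isIn p (PySem.Chars.lower response.toList) = true
    · rw [if_pos hg, pv_loopA_eq, ih]
      rcases hf : (PySem.Chars.splitOn response.toList ['.']).find?
          (fun s => PySem.Chars.isIn p (PySem.Chars.lower s)) with _ | s
      · simp
      · simp
    · simp only [Bool.not_eq_true] at hg
      rw [if_neg (by simp [hg]), ih, pv_guard_false response p hg]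
      simp

-- ===== VERDICT (by name: the statement is the Claim_ definition above) =====
theorem identify_concessions_py_spec : Claim_equal_identify_concessions_py := by
  intro response _
  unfold Spec_identify_concessions_py identify_concessions_py identify_concessions_py_alt
  simp only
  congr 1
  congr 1
  rw [pv_foldA_eq, List.nil_append]
  refine List.filterMap_congr ?_
  intro p hp
  rw [pv_outer_get? _ _ _ hp, PySem.Dict.get?_empty]
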